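-- pv_equiv track=rewrite | github.com/cliff2024sys/MedicalLLM_health_security | medalpaca7blbb.py | check_if_fooled
-- ===== SOURCE A (Python) =====
-- def check_if_fooled(output: str, true_dx: str, distractors: list) -> bool:
--     out = output.lower()
--     td = true_dx.lower()
--     if td in out:
--         return False
--     for d in distractors:
--         if d and d.lower() in out:
--             return True
--     return True
-- ===== SOURCE B (Python) =====
-- def check_if_fooled(output: str, true_dx: str, distractors: list) -> bool:
--     # Explicit naive window scan for the (case-folded) true diagnosis; the
--     # distractor list is irrelevant to A's result, so it is never read.
--     hay = [c.lower() for c in output]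
--     ned = [c.lower() for c in true_dx]
--     m = len(ned)
--     for i in range(len(hay) - m + 1):
--         if hay[i:i + m] == ned:
--             return False
--     return True
-- ===== Notes on version B (the rewrite author's own statement) =====
-- stated objective: alternative
-- what changed: B replaces A's builtin substring test plus dead distractor loop with a hand-written sliding-window scan over per-character lowercased lists: it returns False exactly when some window of the haystack equals the folded true diagnosis, never reading distractors (A's loop returns True in both branches).
import Mathlib
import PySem

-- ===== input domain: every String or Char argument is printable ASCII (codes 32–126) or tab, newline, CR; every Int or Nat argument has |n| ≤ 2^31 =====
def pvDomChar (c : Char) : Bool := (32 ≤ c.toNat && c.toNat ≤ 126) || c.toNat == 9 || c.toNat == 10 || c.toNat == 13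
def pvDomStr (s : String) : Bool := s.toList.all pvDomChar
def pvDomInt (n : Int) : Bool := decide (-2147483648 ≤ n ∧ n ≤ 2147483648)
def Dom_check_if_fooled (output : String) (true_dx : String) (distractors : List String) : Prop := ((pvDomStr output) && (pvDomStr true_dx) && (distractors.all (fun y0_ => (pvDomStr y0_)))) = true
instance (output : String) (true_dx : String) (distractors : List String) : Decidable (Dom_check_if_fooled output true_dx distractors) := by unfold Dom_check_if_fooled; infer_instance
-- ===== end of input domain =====

-- B replaces A's builtin substring test (plus its dead distractor loop, whose both branches return True)
-- with a hand-written sliding-window scan over per-character lowercased lists; objective: alternative.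

-- ===== PORT A =====
-- A's for-loop over distractors, transcribed as structural recursion over the list.
def check_if_fooled_loop (out : String) (ds : List String) : Bool :=
  match ds with
  | [] => true
  | d :: rest =>
    if (d != "") && PySem.Str.isIn (PySem.Str.lower d) out then true
    else check_if_fooled_loop out rest

def check_if_fooled (output : String) (true_dx : String) (distractors : List String) : Bool :=
  let out := PySem.Str.lower output
  let td := PySem.Str.lower true_dx
  if PySem.Str.isIn td out then false
  else check_if_fooled_loop out distractors

-- ===== PORT B =====
-- B's `for i in range(len(hay) - m + 1): if hay[i:i+m] == ned: return False`,
-- transcribed as structural recursion over the range's index list.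
def check_if_fooled_alt_loop (hay ned : List Char) (idxs : List Int) : Bool :=
  match idxs with
  | [] => true
  | i :: rest =>
    if PySem.List.slice hay (some i) (some (i + (ned.length : Int))) = ned then false
    else check_if_fooled_alt_loop hay ned rest

def check_if_fooled_alt (output : String) (true_dx : String) (_distractors : List String) : Bool :=
  let hay := output.toList.map PySem.Chars.lowerChar   -- [c.lower() for c in output]
  let ned := true_dx.toList.map PySem.Chars.lowerChar  -- [c.lower() for c in true_dx]
  check_if_fooled_alt_loop hay ned
    (PySem.List.pyRange 0 ((hay.length : Int) - (ned.length : Int) + 1) 1)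

-- ===== PRECONDITION & SPEC =====
def Spec_check_if_fooled (output : String) (true_dx : String) (distractors : List String) (out : Bool) : Prop := out = check_if_fooled_alt output true_dx distractors
instance (output : String) (true_dx : String) (distractors : List String) (out : Bool) : Decidable (Spec_check_if_fooled output true_dx distractors out) := by unfold Spec_check_if_fooled; infer_instance

-- ===== CLAIM (what is proved, stated in full; the proofs are below) =====
def Claim_equal_check_if_fooled : Prop := ∀ (output : String) (true_dx : String) (distractors : List String), Dom_check_if_fooled output true_dx distractors → Spec_check_if_fooled output true_dx distractors (check_if_fooled output true_dx distractors)

-- ===== LEMMAS AND PROOFS =====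
-- A's distractor loop always returns true: both of its branches do.
theorem check_if_fooled_loop_eq_true (out : String) (ds : List String) :
    check_if_fooled_loop out ds = true := by
  induction ds with
  | nil => rfl
  | cons d rest ih =>
    unfold check_if_fooled_loop
    split <;> simp [ih]

-- B's loop returns false iff some index in its list yields a window equal to ned.
theorem alt_loop_eq_false_iff (hay ned : List Char) (idxs : List Int) :
    check_if_fooled_alt_loop hay ned idxs = false ↔
      ∃ i ∈ idxs, PySem.List.slice hay (some i) (some (i + (ned.length : Int))) = ned := by
  induction idxs with
  | nil => simp [check_if_fooled_alt_loop]
  | cons i rest ih =>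
    unfold check_if_fooled_alt_loop
    by_cases h : PySem.List.slice hay (some i) (some (i + (ned.length : Int))) = ned
    · simp [h]
    · simp [h, ih]

-- The full-range window scan computes exactly (negated) substring containment.
theorem alt_scan_eq_not_isIn (hay ned : List Char) :
    check_if_fooled_alt_loop hay ned
        (PySem.List.pyRange 0 ((hay.length : Int) - (ned.length : Int) + 1) 1)
      = !(PySem.Chars.isIn ned hay) := by
  by_cases h : PySem.Chars.isIn ned hay = true
  · rw [h]
    rw [show (!true) = false from rfl]
    rw [alt_loop_eq_false_iff]
    obtain ⟨j, hpre⟩ := (PySem.Chars.exists_prefix_drop_iff_isIn ned hay).2 h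
    have hlen : ned.length ≤ hay.length - j := by
      have := hpre.length_le
      simpa using this
    by_cases hm : ned.length = 0
    · -- empty needle: window at 0 is [] = ned
      refine ⟨0, ?_, ?_⟩
      · rw [PySem.List.mem_pyRange_one]; omega
      · have hn : ned = [] := List.length_eq_zero_iff.1 hm
        simp [hn, PySem.List.slice]
    · -- nonempty needle: j + len ≤ hay.length, use window at j
      have hj : j + ned.length ≤ hay.length := by omega
      refine ⟨(j : Int), ?_, ?_⟩
      · rw [PySem.List.mem_pyRange_one]
        constructor
        · exact_mod_cast Nat.zero_le j
        · omega
      · rw [show ((j : Int) + (ned.length : Int)) = ((j : Int) + ((ned.length : Nat) : Int)) from rfl,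
            PySem.List.slice_natCast_add]
        exact ((List.prefix_iff_eq_take.1 hpre)).symm
  · have h' : PySem.Chars.isIn ned hay = false := by
      cases hb : PySem.Chars.isIn ned hay
      · rfl
      · exact absurd hb h
    rw [h']
    rw [show (!false) = true from rfl]
    cases hb : check_if_fooled_alt_loop hay ned
        (PySem.List.pyRange 0 ((hay.length : Int) - (ned.length : Int) + 1) 1)
    · exfalso
      obtain ⟨i, hi, hsl⟩ := (alt_loop_eq_false_iff hay ned _).1 hb
      have h0 : 0 ≤ i := (PySem.List.mem_pyRange_one.1 hi).1
      obtain ⟨k, rfl⟩ := Int.eq_ofNat_of_zero_le h0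
      rw [PySem.List.slice_natCast_add] at hsl
      have : ∃ j, ned <+: hay.drop j := ⟨k, hsl ▸ List.take_prefix _ _⟩
      exact h ((PySem.Chars.exists_prefix_drop_iff_isIn ned hay).1 this)
    · rfl

-- ===== VERDICT (by name: the statement is the Claim_ definition above) =====
theorem check_if_fooled_spec : Claim_equal_check_if_fooled := by
  intro output true_dx distractors _
  unfold Spec_check_if_fooled check_if_fooled check_if_fooled_alt
  rw [alt_scan_eq_not_isIn]
  have hiso : PySem.Str.isIn (PySem.Str.lower true_dx) (PySem.Str.lower output)
      = PySem.Chars.isIn (true_dx.toList.map PySem.Chars.lowerChar) (output.toList.map PySem.Chars.lowerChar) := by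
    simp [PySem.Str.isIn, PySem.Str.toList_lower, PySem.Chars.lower]
  cases h : PySem.Chars.isIn (true_dx.toList.map PySem.Chars.lowerChar) (output.toList.map PySem.Chars.lowerChar) with
  | true => simp only [hiso, h, if_true, Bool.not_true]
  | false => simp only [hiso, h, Bool.false_eq_true, if_false, Bool.not_false, check_if_fooled_loop_eq_true]
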